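-- pv_equiv track=rewrite | github.com/konjoai/squash | squash/artifact_extractor.py | _parse_hf_tags
-- ===== SOURCE A (Python) =====
-- def _parse_hf_tags(tags: list[str]) -> dict[str, list[str]]:
--     """Split raw HuggingFace tags into namespaced buckets.
--
--     HF tags follow the convention ``"namespace:value"`` (e.g.
--     ``"language:en"``, ``"license:apache-2.0"``). Tags without a colon
--     are stored under the ``"other"`` key.
--     """
--     buckets: dict[str, list[str]] = {}
--     for tag in tags or []:
--         if ":" in tag:
--             ns, _, val = tag.partition(":")
--             buckets.setdefault(ns, []).append(val)
--         else:
--             buckets.setdefault("other", []).append(tag)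
--     return buckets
-- ===== SOURCE B (Python) =====
-- def _parse_hf_tags(tags: list[str]) -> dict[str, list[str]]:
--     """Split raw HuggingFace tags into namespaced buckets.
--
--     Alternative decomposition: compute each tag's namespace key, take the
--     distinct keys in first-occurrence order, then build each bucket with a
--     comprehension over the whole tag list.
--     """
--     ts = list(tags or [])
--
--     def ns(t: str) -> str:
--         return t.partition(":")[0] if ":" in t else "other"
--
--     def val(t: str) -> str:
--         return t.partition(":")[2] if ":" in t else t
--
--     keys = dict.fromkeys(ns(t) for t in ts)
--     return {k: [val(t) for t in ts if ns(t) == k] for k in keys}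
-- ===== Notes on version B (the rewrite author's own statement) =====
-- stated objective: alternative
-- what changed: Replaces A's single pass with setdefault-append into a mutable dict by a two-phase plan: compute the distinct namespace keys in first-occurrence order (dict.fromkeys) and then build each bucket by a filtering comprehension over the whole tag list.
import Mathlib
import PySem

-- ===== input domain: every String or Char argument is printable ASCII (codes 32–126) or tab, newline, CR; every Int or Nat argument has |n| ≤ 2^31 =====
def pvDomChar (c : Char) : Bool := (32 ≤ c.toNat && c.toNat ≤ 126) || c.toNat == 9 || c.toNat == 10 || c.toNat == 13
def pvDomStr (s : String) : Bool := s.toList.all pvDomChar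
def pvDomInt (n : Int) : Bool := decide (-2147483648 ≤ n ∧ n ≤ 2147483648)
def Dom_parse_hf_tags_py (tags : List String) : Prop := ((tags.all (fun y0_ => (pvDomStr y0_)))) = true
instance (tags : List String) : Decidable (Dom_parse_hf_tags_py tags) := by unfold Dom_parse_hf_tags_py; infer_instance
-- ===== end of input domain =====

-- B buckets tags by first computing the distinct namespace keys, then filtering the list once per key,
-- instead of A's single setdefault-append pass; same return value, no speed claim.

-- ===== PORT A =====
-- literal port of A: one fold over the tags, setdefault(ns, []).append(val)
-- (= buckets[ns] = buckets.get(ns, []) + [val], i.e. Dict.modify ns [] (· ++ [val]));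
-- tag.partition(":") is ported by hand via the first index of ':' (exact: inside the
-- branch ":" in tag holds, so find ≥ 0 and take/drop at it are Python's partition).
def parse_hf_tags_py (tags : List String) : List (String × List String) :=
  (tags.foldl (fun buckets tag =>
      if PySem.Str.isIn ":" tag then
        let i := (PySem.Chars.find tag.toList [':']).toNat
        let ns := String.ofList (tag.toList.take i)
        let val := String.ofList (tag.toList.drop (i + 1))
        buckets.modify ns [] (· ++ [val])
      else
        buckets.modify "other" [] (· ++ [tag]))
    PySem.Dict.empty).items

-- ===== PORT B =====
-- B's helper ns(t): namespace before the first ':', or "other" if no colon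
def pvNs (t : String) : String :=
  if PySem.Str.isIn ":" t then
    String.ofList (t.toList.take (PySem.Chars.find t.toList [':']).toNat)
  else "other"

-- B's helper val(t): suffix after the first ':', or the whole tag if no colon
def pvVal (t : String) : String :=
  if PySem.Str.isIn ":" t then
    String.ofList (t.toList.drop ((PySem.Chars.find t.toList [':']).toNat + 1))
  else t

-- literal port of B: keys = dict.fromkeys(ns(t) for t in ts), then one bucket per key by filtering
def parse_hf_tags_py_alt (tags : List String) : List (String × List String) :=
  (PySem.List.dedup (tags.map pvNs)).map
    (fun k => (k, (tags.filter (fun t => pvNs t == k)).map pvVal))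

-- ===== PRECONDITION & SPEC =====
def Spec_parse_hf_tags_py (tags : List String) (out : List (String × List String)) : Prop := out = parse_hf_tags_py_alt tags
instance (tags : List String) (out : List (String × List String)) : Decidable (Spec_parse_hf_tags_py tags out) := by unfold Spec_parse_hf_tags_py; infer_instance

-- ===== CLAIM (what is proved, stated in full; the proofs are below) =====
def Claim_equal_parse_hf_tags_py : Prop := ∀ (tags : List String), Dom_parse_hf_tags_py tags → Spec_parse_hf_tags_py tags (parse_hf_tags_py tags)

-- ===== LEMMAS AND PROOFS =====

-- A's loop body is, uniformly in the colon test, a modify at key pvNs tag appending pvVal tag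
theorem pv_step_eq (buckets : PySem.Dict String (List String)) (tag : String) :
    (if PySem.Str.isIn ":" tag then
       let i := (PySem.Chars.find tag.toList [':']).toNat
       let ns := String.ofList (tag.toList.take i)
       let val := String.ofList (tag.toList.drop (i + 1))
       buckets.modify ns [] (· ++ [val])
     else
       buckets.modify "other" [] (· ++ [tag]))
    = buckets.modify (pvNs tag) [] (· ++ [pvVal tag]) := by
  by_cases h : PySem.Chars.isIn [':'] tag.toList <;> simp [pvNs, pvVal, PySem.Str.isIn, h]

-- A's dict, characterised: keys are the deduped namespaces, value at k is the filtered-mapped bucket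
theorem pv_a_eq (tags : List String) :
    parse_hf_tags_py tags = parse_hf_tags_py_alt tags := by
  unfold parse_hf_tags_py parse_hf_tags_py_alt
  have h1 : (tags.foldl (fun buckets tag =>
      if PySem.Str.isIn ":" tag then
        let i := (PySem.Chars.find tag.toList [':']).toNat
        let ns := String.ofList (tag.toList.take i)
        let val := String.ofList (tag.toList.drop (i + 1))
        buckets.modify ns [] (· ++ [val])
      else
        buckets.modify "other" [] (· ++ [tag])) PySem.Dict.empty)
      = ((tags.map (fun t => (pvNs t, pvVal t))).foldl
            (fun d p => d.modify p.1 [] (· ++ [p.2])) PySem.Dict.empty) := by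
    rw [List.foldl_map]
    apply PySem.List.foldl_congr_mem
    intro buckets tag _
    exact pv_step_eq buckets tag
  rw [h1]
  set l := tags.map (fun t => (pvNs t, pvVal t)) with hl
  have hnd : ((l.foldl (fun d p => d.modify p.1 [] (· ++ [p.2])) PySem.Dict.empty)).keys.Nodup := by
    exact PySem.Dict.nodup_keys_foldl_modify_key l (fun p => p.1) []
      (fun d p => (· ++ [p.2])) PySem.Dict.empty PySem.Dict.nodup_keys_empty
  rw [PySem.Dict.items_eq_map_keys _ hnd []]
  have hkeys : ((l.foldl (fun d p => d.modify p.1 [] (· ++ [p.2])) PySem.Dict.empty)).keys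
      = PySem.List.dedup (tags.map pvNs) := by
    rw [PySem.Dict.keys_foldl_modify_key l (fun p => p.1) [] (fun d p => (· ++ [p.2]))]
    simp [hl, PySem.Set.update, PySem.List.dedup_eq_ofList, PySem.Set.ofList_eq_foldl,
      PySem.Dict.keys_empty, List.foldl_map]
  rw [hkeys]
  apply List.map_congr_left
  intro k _
  rw [PySem.Dict.getD_foldl_modify_append]
  simp [hl, List.filter_map, List.map_map, Function.comp_def]

-- ===== VERDICT (by name: the statement is the Claim_ definition above) =====
theorem parse_hf_tags_py_spec : Claim_equal_parse_hf_tags_py := by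
  intro tags _
  unfold Spec_parse_hf_tags_py
  exact pv_a_eq tags
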